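-- pv_equiv track=rewrite | github.com/kaushikkaralgikar/Frequent-Itemsets | task1.py | get_higher_order_candidate_list
-- ===== SOURCE A (Python) =====
-- def get_higher_order_candidate_list(combination_list):
--     higher_order_list = list()
--     if combination_list is not None and len(combination_list)>0:
--         curr_size = len(combination_list[0])
--         for i, p1 in enumerate(combination_list[:-1]):
--             for p2 in combination_list[i+1:]:
--                 if(p1[:-1]==p2[:-1]):
--                     new_combination = tuple(sorted(list(set(p1).union(set(p2)))))
--                     higher_order_list.append(new_combination)
--                 else:
--                     break
--         return higher_order_list
-- ===== SOURCE B (Python) =====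
-- # B: single pass that groups consecutive itemsets sharing a prefix into runs,
-- # then emits all pairs inside each run (simpler decomposition; no break-driven
-- # rescan of the tail for every index).
--
-- def _emit(run, out):
--     for i, p in enumerate(run):
--         for q in run[i + 1:]:
--             out.append(tuple(sorted(set(p) | set(q))))
--
-- def get_higher_order_candidate_list(combination_list):
--     if not combination_list:
--         return None
--     out = []
--     run = [combination_list[0]]
--     for x in combination_list[1:]:
--         if x[:-1] == run[0][:-1]:
--             run.append(x)
--         else:
--             _emit(run, out)
--             run = [x]
--     _emit(run, out)
--     return out
-- ===== Notes on version B (the rewrite author's own statement) =====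
-- stated objective: simpler
-- what changed: Replaces the index-based nested loop with an inner break by a single pass that collects consecutive equal-prefix itemsets into runs and then emits all pairs within each run.
-- outside the precondition, e.g. on get_higher_order_candidate_list([]): A returns None, B returns None
import Mathlib
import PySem

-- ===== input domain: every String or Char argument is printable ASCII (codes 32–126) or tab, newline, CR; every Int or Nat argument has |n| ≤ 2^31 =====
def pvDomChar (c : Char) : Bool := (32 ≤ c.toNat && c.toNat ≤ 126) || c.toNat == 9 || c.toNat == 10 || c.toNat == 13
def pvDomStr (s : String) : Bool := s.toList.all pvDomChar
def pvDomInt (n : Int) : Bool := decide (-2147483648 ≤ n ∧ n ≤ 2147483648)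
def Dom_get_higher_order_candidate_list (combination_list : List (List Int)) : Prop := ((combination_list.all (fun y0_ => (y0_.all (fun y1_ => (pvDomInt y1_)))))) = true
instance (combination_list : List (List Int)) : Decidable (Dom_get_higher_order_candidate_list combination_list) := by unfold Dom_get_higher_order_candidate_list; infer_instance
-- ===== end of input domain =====

-- B groups consecutive equal-prefix itemsets into runs and pairs within each run,
-- replacing A's indexed nested loop with an inner break (objective: simpler).
-- Pre_ excludes the empty list, on which the Python A returns None (no value of the list type).

-- ===== PORT A =====
-- tuple(sorted(list(set(p1).union(set(p2)))))
def pvA_comb (p1 p2 : List Int) : List Int :=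
  PySem.List.sorted (PySem.Set.union (PySem.Set.ofList p1) (PySem.Set.ofList p2)) (fun x => x) false

-- inner 'for p2 in combination_list[i+1:]' with the break on prefix mismatch
def pvA_inner (p1 : List Int) : List (List Int) → List (List Int)
  | [] => []
  | p2 :: rest =>
      if p1.dropLast = p2.dropLast then pvA_comb p1 p2 :: pvA_inner p1 rest else []

-- outer 'for i, p1 in enumerate(combination_list[:-1])' paired with the tail
-- combination_list[i+1:]; the last index (excluded by [:-1]) has an empty tail,
-- so recursing over the whole list appends the same elements in the same order.
def pvA_outer : List (List Int) → List (List Int)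
  | [] => []
  | p1 :: rest => pvA_inner p1 rest ++ pvA_outer rest

def get_higher_order_candidate_list (combination_list : List (List Int)) : List (List Int) :=
  if 0 < combination_list.length then pvA_outer combination_list else []

-- ===== PORT B =====
def pvB_comb (p q : List Int) : List Int :=
  PySem.List.sorted (PySem.Set.union (PySem.Set.ofList p) (PySem.Set.ofList q)) (fun x => x) false

-- _emit: pair every element of the run with the later ones
def pvB_emit : List (List Int) → List (List Int)
  | [] => []
  | p :: rest => rest.map (pvB_comb p) ++ pvB_emit rest

-- the main loop; the current run is r0 :: rtail (run[0] = r0)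
def pvB_loop (out : List (List Int)) (r0 : List Int) (rtail : List (List Int)) :
    List (List Int) → List (List Int)
  | [] => out ++ pvB_emit (r0 :: rtail)
  | x :: xs =>
      if x.dropLast = r0.dropLast then pvB_loop out r0 (rtail ++ [x]) xs
      else pvB_loop (out ++ pvB_emit (r0 :: rtail)) x [] xs

def get_higher_order_candidate_list_alt (combination_list : List (List Int)) : List (List Int) :=
  match combination_list with
  | [] => []
  | c0 :: cs => pvB_loop [] c0 [] cs

-- ===== PRECONDITION & SPEC =====
-- Pre_ excludes only the empty list, where the Python A (and B) return None rather than a list.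
def Pre_get_higher_order_candidate_list (combination_list : List (List Int)) : Prop :=
  combination_list ≠ []
instance (combination_list : List (List Int)) : Decidable (Pre_get_higher_order_candidate_list combination_list) := by unfold Pre_get_higher_order_candidate_list; infer_instance

def pvWitness_get_higher_order_candidate_list : List (List Int) := [[1, 2], [1, 3], [2, 3]]

def Spec_get_higher_order_candidate_list (combination_list : List (List Int)) (out : List (List Int)) : Prop := out = get_higher_order_candidate_list_alt combination_list
instance (combination_list : List (List Int)) (out : List (List Int)) : Decidable (Spec_get_higher_order_candidate_list combination_list out) := by unfold Spec_get_higher_order_candidate_list; infer_instance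

-- ===== CLAIM (what is proved, stated in full; the proofs are below) =====
def Claim_equal_get_higher_order_candidate_list : Prop := ∀ (combination_list : List (List Int)), Dom_get_higher_order_candidate_list combination_list → Pre_get_higher_order_candidate_list combination_list → Spec_get_higher_order_candidate_list combination_list (get_higher_order_candidate_list combination_list)

-- ===== LEMMAS AND PROOFS =====

theorem pv_comb_eq (p q : List Int) : pvA_comb p q = pvB_comb p q := rfl

-- boundary condition: xs is empty or its head's prefix differs from π
def pvBound (π : List Int) : List (List Int) → Prop
  | [] => True
  | x :: _ => x.dropLast ≠ π

-- A's inner scan over a run followed by a boundary is a map over the run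
theorem pv_inner_run (p : List Int) (run xs : List (List Int)) (π : List Int)
    (hp : p.dropLast = π) (hr : ∀ r ∈ run, r.dropLast = π) (hb : pvBound π xs) :
    pvA_inner p (run ++ xs) = run.map (pvA_comb p) := by
  induction run with
  | nil =>
      cases xs with
      | nil => rfl
      | cons x xs' =>
          simp only [List.nil_append, pvA_inner, List.map_nil]
          rw [if_neg]
          intro h; exact hb (h ▸ hp ▸ rfl)
  | cons r rt ih =>
      have hrp : r.dropLast = π := hr r (by simp)
      simp only [List.cons_append, pvA_inner, List.map_cons]
      rw [if_pos (by rw [hp, hrp]), ih (fun x hx => hr x (by simp [hx]))]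

-- A's outer recursion over a run followed by a boundary splits as emit ++ rest
theorem pv_outer_run (run xs : List (List Int)) (π : List Int)
    (hr : ∀ r ∈ run, r.dropLast = π) (hb : pvBound π xs) :
    pvA_outer (run ++ xs) = pvB_emit run ++ pvA_outer xs := by
  induction run with
  | nil => rfl
  | cons r rt ih =>
      have hrp : r.dropLast = π := hr r (by simp)
      have hrt : ∀ x ∈ rt, x.dropLast = π := fun x hx => hr x (by simp [hx])
      simp only [List.cons_append, pvA_outer, pvB_emit]
      rw [pv_inner_run r (run := rt) (xs := xs) π hrp hrt hb, ih hrt]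
      simp [pv_comb_eq]

-- loop invariant for B's single pass
theorem pv_loop_inv (xs : List (List Int)) (out : List (List Int)) (r0 : List Int)
    (rtail : List (List Int)) (hr : ∀ r ∈ rtail, r.dropLast = r0.dropLast) :
    pvB_loop out r0 rtail xs = out ++ pvA_outer (r0 :: rtail ++ xs) := by
  induction xs generalizing out r0 rtail with
  | nil =>
      simp only [pvB_loop, List.append_nil]
      rw [show (r0 :: rtail : List (List Int)) = (r0 :: rtail) ++ [] by simp,
        pv_outer_run (r0 :: rtail) [] r0.dropLast
          (by
            intro r hrm
            rcases List.mem_cons.1 hrm with h | h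
            · rw [h]
            · exact hr r h)
          (by trivial)]
      simp [pvA_outer]
  | cons x xs' ih =>
      simp only [pvB_loop]
      by_cases hx : x.dropLast = r0.dropLast
      · rw [if_pos hx,
          ih out r0 (rtail ++ [x])
            (by intro r hrm
                rcases List.mem_append.1 hrm with h | h
                · exact hr r h
                · simp at h; rw [h]; exact hx)]
        simp
      · rw [if_neg hx, ih (out ++ pvB_emit (r0 :: rtail)) x []  (by simp)]
        have := pv_outer_run (r0 :: rtail) (x :: xs') r0.dropLast
          (by
            intro r hrm
            rcases List.mem_cons.1 hrm with h | h
            · rw [h]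
            · exact hr r h)
          (by exact hx)
        simp only [List.cons_append] at this ⊢
        rw [this, List.append_assoc]
        simp [pvA_outer]

-- ===== VERDICT (by name: the statement is the Claim_ definition above) =====
theorem get_higher_order_candidate_list_spec : Claim_equal_get_higher_order_candidate_list := by
  intro cl _ hpre
  unfold Spec_get_higher_order_candidate_list
  cases cl with
  | nil => exact absurd rfl hpre
  | cons c0 cs =>
      unfold get_higher_order_candidate_list get_higher_order_candidate_list_alt
      rw [if_pos (by simp)]
      show pvA_outer (c0 :: cs) = pvB_loop [] c0 [] cs
      rw [pv_loop_inv cs [] c0 [] (by simp)]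
      simp
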